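-- pv_equiv track=rewrite | github.com/imspzero/chan_lun_py | chan_lun_util.py | search_final_fen_bi
-- ===== SOURCE A (Python) =====
-- def search_final_fen_bi(merge_line_list, point_index_list,
--                         point_index_matrix, result_array, index, end_index):
--     #  递归查找查看最终正确的笔划分
--     #  MergeLineDTO[], boolean[], boolean[][],boolean[],integer,integer
--     if index == end_index:
--         return True
--     else:
--         i = index+1
--         while i <= end_index:
--             if point_index_matrix[index][i]:
--                 result_array[index] = True
--                 result_array[i] = True
--                 if search_final_fen_bi(merge_line_list, point_index_list,
--                                        point_index_matrix,result_array,
--                                        i, end_index):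
--                     return True
--                 else:
--                     result_array[index] = False
--                     result_array[i] = False
--             i += 1
--     return False
-- ===== SOURCE B (Python) =====
-- def search_final_fen_bi(merge_line_list, point_index_list,
--                         point_index_matrix, result_array, index, end_index):
--     # DP reachability over [index, end_index], then greedy smallest-next-index
--     # path reconstruction (the path A's DFS marks). Return-value equivalence
--     # only: B marks the same path as A when result_array starts all-False;
--     # A's backtracking may additionally clear pre-set True entries (and on
--     # failure leaves such entries cleared), B never writes False.
--     if index == end_index:
--         return True
--     if index > end_index:
--         return False
--     # reach[j]: a path j -> end_index exists using edges (j, k) with j < k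
--     reach = {end_index: True}
--     for j in range(end_index - 1, index - 1, -1):
--         reach[j] = any(point_index_matrix[j][k] and reach[k]
--                        for k in range(j + 1, end_index + 1))
--     if not reach[index]:
--         return False
--     # mark the lexicographically smallest successful path
--     j = index
--     while j != end_index:
--         k = next(k for k in range(j + 1, end_index + 1)
--                  if point_index_matrix[j][k] and reach[k])
--         result_array[j] = True
--         result_array[k] = True
--         j = k
--     return True
-- ===== Notes on version B (the rewrite author's own statement) =====
-- stated objective: alternative
-- what changed: Replaced A's backtracking DFS by a bottom-up DP table of reachability over [index, end_index] followed by a greedy smallest-next-index path reconstruction for the marking; return-value equivalence only (A's backtracking can clear pre-set True entries of result_array, B never writes False).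
import Mathlib
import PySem

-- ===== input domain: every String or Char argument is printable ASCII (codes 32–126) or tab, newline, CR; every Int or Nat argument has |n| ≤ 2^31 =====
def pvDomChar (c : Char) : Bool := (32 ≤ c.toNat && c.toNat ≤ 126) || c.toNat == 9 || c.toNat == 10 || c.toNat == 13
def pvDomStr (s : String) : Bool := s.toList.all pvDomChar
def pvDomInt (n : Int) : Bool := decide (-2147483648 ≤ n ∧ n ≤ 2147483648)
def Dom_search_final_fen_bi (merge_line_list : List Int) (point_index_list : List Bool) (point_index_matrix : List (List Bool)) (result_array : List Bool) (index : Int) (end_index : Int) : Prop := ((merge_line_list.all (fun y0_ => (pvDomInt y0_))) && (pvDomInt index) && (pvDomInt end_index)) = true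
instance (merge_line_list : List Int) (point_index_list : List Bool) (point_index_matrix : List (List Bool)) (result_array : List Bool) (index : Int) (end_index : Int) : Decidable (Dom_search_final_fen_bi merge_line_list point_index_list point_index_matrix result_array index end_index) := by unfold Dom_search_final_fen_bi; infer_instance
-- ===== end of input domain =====

-- B replaces A's backtracking DFS by a bottom-up reachability DP (an alternative
-- algorithm of similar cost on typical inputs); equivalence is about the RETURN VALUE only: A mutates result_array (and its
-- backtracking may clear pre-set True entries), the statements of A and B that only write
-- result_array are not represented in the ports.

-- ===== PORT A =====
-- A's recursion, with the while-loop as pvA_loop; the writes to result_array are pure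
-- mutation never read back and do not influence the return value, so they are dropped.
-- point_index_matrix[index][i] is ported with pyGetD (default never used inside Pre_).
mutual
def pvA_go (M : List (List Bool)) (e j : Int) : Bool :=
  if j = e then true
  else pvA_loop M e j (j + 1)
termination_by 2 * (e - j).toNat + 1
decreasing_by omega
def pvA_loop (M : List (List Bool)) (e j i : Int) : Bool :=
  if i <= e then
    if PySem.List.pyGetD (PySem.List.pyGetD M j []) i false then
      if pvA_go M e i then true else pvA_loop M e j (i + 1)
    else pvA_loop M e j (i + 1)
  else false
termination_by 2 * (e + 1 - i).toNat
decreasing_by all_goals omega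
end

def search_final_fen_bi (merge_line_list : List Int) (point_index_list : List Bool) (point_index_matrix : List (List Bool)) (result_array : List Bool) (index : Int) (end_index : Int) : Bool :=
  pvA_go point_index_matrix end_index index

-- ===== PORT B =====
-- Source B's DP: dict reach built from end_index-1 down to index, then reach[index].
-- Source B's final marking while-loop only writes result_array and then returns True;
-- it is not represented (the return value after the reach[index] test is True).
def search_final_fen_bi_alt (merge_line_list : List Int) (point_index_list : List Bool) (point_index_matrix : List (List Bool)) (result_array : List Bool) (index : Int) (end_index : Int) : Bool :=
  if index = end_index then true
  else if index > end_index then false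
  else
    let reach := (PySem.List.pyRange (end_index - 1) (index - 1) (-1)).foldl
      (fun d j => d.insert j ((PySem.List.pyRange (j + 1) (end_index + 1) 1).any
        (fun k => PySem.List.pyGetD (PySem.List.pyGetD point_index_matrix j []) k false && d.getD k false)))
      ((PySem.Dict.empty).insert end_index true)
    if !(reach.getD index false) then false else true

-- ===== PRECONDITION & SPEC =====
-- Pre_ excludes the inputs on which either Python raises IndexError: when index < end_index
-- both programs index rows index..end_index-1 and columns up to end_index (and A writes
-- result_array up to end_index).  It is slightly conservative (it bounds every row in
-- positions index..end_index-1, and result_array, even when no edge is ever found): A's DFS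
-- can short-circuit past a too-short unreached row and return where B's DP raises -- see the
-- cited example in claim.json.
def Pre_search_final_fen_bi (merge_line_list : List Int) (point_index_list : List Bool) (point_index_matrix : List (List Bool)) (result_array : List Bool) (index : Int) (end_index : Int) : Prop :=
  index < end_index →
    (0 ≤ index ∧ end_index ≤ (point_index_matrix.length : Int) ∧
     (∀ r ∈ (point_index_matrix.take end_index.toNat).drop index.toNat, end_index < (r.length : Int)) ∧
     end_index < (result_array.length : Int))
instance (merge_line_list : List Int) (point_index_list : List Bool) (point_index_matrix : List (List Bool)) (result_array : List Bool) (index : Int) (end_index : Int) : Decidable (Pre_search_final_fen_bi merge_line_list point_index_list point_index_matrix result_array index end_index) := by unfold Pre_search_final_fen_bi; infer_instance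

def pvWitness_search_final_fen_bi : List Int × List Bool × List (List Bool) × List Bool × Int × Int :=
  ([], [], [[false, true], [false, false]], [false, false], 0, 1)

def Spec_search_final_fen_bi (merge_line_list : List Int) (point_index_list : List Bool) (point_index_matrix : List (List Bool)) (result_array : List Bool) (index : Int) (end_index : Int) (out : Bool) : Prop := out = search_final_fen_bi_alt merge_line_list point_index_list point_index_matrix result_array index end_index
instance (merge_line_list : List Int) (point_index_list : List Bool) (point_index_matrix : List (List Bool)) (result_array : List Bool) (index : Int) (end_index : Int) (out : Bool) : Decidable (Spec_search_final_fen_bi merge_line_list point_index_list point_index_matrix result_array index end_index out) := by unfold Spec_search_final_fen_bi; infer_instance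

-- ===== CLAIM (what is proved, stated in full; the proofs are below) =====
def Claim_equal_search_final_fen_bi : Prop := ∀ (merge_line_list : List Int) (point_index_list : List Bool) (point_index_matrix : List (List Bool)) (result_array : List Bool) (index : Int) (end_index : Int), Dom_search_final_fen_bi merge_line_list point_index_list point_index_matrix result_array index end_index → Pre_search_final_fen_bi merge_line_list point_index_list point_index_matrix result_array index end_index → Spec_search_final_fen_bi merge_line_list point_index_list point_index_matrix result_array index end_index (search_final_fen_bi merge_line_list point_index_list point_index_matrix result_array index end_index)

-- ===== LEMMAS AND PROOFS =====

-- the edge test both programs perform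
def pvEdge (M : List (List Bool)) (j k : Int) : Bool :=
  PySem.List.pyGetD (PySem.List.pyGetD M j []) k false

-- fuelled reference reachability: reachN M e n j decides "a strictly increasing path
-- j -> e along pvEdge exists", provided n ≥ (e - j).toNat
def reachN (M : List (List Bool)) (e : Int) : Nat → Int → Bool
  | 0, j => decide (j = e)
  | n + 1, j =>
    if j = e then true
    else (PySem.List.pyRange (j + 1) (e + 1) 1).any
      (fun k => pvEdge M j k && reachN M e n k)

def reachC (M : List (List Bool)) (e j : Int) : Bool := reachN M e (e - j).toNat j

theorem any_congr_mem {α : Type} {l : List α} {f g : α → Bool}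
    (h : ∀ x ∈ l, f x = g x) : l.any f = l.any g := by
  induction l with
  | nil => rfl
  | cons a t ih => simp_all

theorem reachN_stable (M : List (List Bool)) (e : Int) :
    ∀ n : Nat, ∀ j : Int, (e - j).toNat ≤ n → reachN M e n j = reachC M e j := by
  intro n
  induction n using Nat.strong_induction_on with
  | _ n ih =>
    intro j hn
    match n with
    | 0 =>
      have h0 : (e - j).toNat = 0 := Nat.le_antisymm hn (Nat.zero_le _)
      unfold reachC; rw [h0]
    | Nat.succ m =>
      by_cases hje : j = e
      · have h0 : (e - j).toNat = 0 := by omega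
        unfold reachC; rw [h0]
        simp [reachN, hje]
      · by_cases hlt : j < e
        · have h1 : (e - j).toNat = ((e - j).toNat - 1) + 1 := by omega
          unfold reachC
          rw [h1]
          simp only [reachN, if_neg hje]
          apply any_congr_mem
          intro k hk
          rw [PySem.List.mem_pyRange_one] at hk
          have h2 : (e - k).toNat ≤ m := by omega
          have h3 : (e - k).toNat ≤ (e - j).toNat - 1 := by omega
          rw [ih m (by omega) k h2, ih ((e - j).toNat - 1) (by omega) k h3]
        · -- e ≤ j, j ≠ e : both sides false
          have h0 : (e - j).toNat = 0 := by omega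
          unfold reachC; rw [h0]
          simp only [reachN, if_neg hje, decide_eq_false hje]
          rw [PySem.List.pyRange_one_eq_nil (by omega)]
          rfl

theorem reachC_eq (M : List (List Bool)) (e j : Int) :
    reachC M e j =
      if j = e then true
      else (PySem.List.pyRange (j + 1) (e + 1) 1).any
        (fun k => pvEdge M j k && reachC M e k) := by
  by_cases hje : j = e
  · subst hje; simp [reachC, reachN]
  · by_cases hlt : j < e
    · have h1 : (e - j).toNat = ((e - j).toNat - 1) + 1 := by omega
      rw [if_neg hje]
      unfold reachC
      rw [h1]
      simp only [reachN, if_neg hje]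
      apply any_congr_mem
      intro k hk
      rw [PySem.List.mem_pyRange_one] at hk
      rw [reachN_stable M e ((e - j).toNat - 1) k (by omega)]
      rfl
    · have h0 : (e - j).toNat = 0 := by omega
      rw [if_neg hje, PySem.List.pyRange_one_eq_nil (by omega)]
      unfold reachC; rw [h0]
      simp [reachN, hje]

-- A's DFS computes reachability
mutual
theorem pvA_go_eq (M : List (List Bool)) (e j : Int) :
    pvA_go M e j = reachC M e j := by
  rw [pvA_go]
  by_cases hje : j = e
  · rw [if_pos hje, reachC_eq, if_pos hje]
  · rw [if_neg hje, reachC_eq, if_neg hje]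
    exact pvA_loop_eq M e j (j + 1)
termination_by 2 * (e - j).toNat + 1
decreasing_by omega
theorem pvA_loop_eq (M : List (List Bool)) (e j i : Int) :
    pvA_loop M e j i =
      (PySem.List.pyRange i (e + 1) 1).any
        (fun k => pvEdge M j k && reachC M e k) := by
  rw [pvA_loop]
  by_cases hi : i ≤ e
  · rw [if_pos hi, PySem.List.pyRange_one_cons (by omega : i < e + 1)]
    rw [List.any_cons]
    rw [pvA_go_eq M e i, pvA_loop_eq M e j (i + 1)]
    show (if pvEdge M j i then (if reachC M e i then true else _) else _) = _
    cases pvEdge M j i <;> cases reachC M e i <;> simp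
  · rw [if_neg hi, PySem.List.pyRange_one_eq_nil (by omega)]
    rfl
termination_by 2 * (e + 1 - i).toNat
decreasing_by all_goals omega
end

-- B's fold, named for the proofs (definitionally the foldl in search_final_fen_bi_alt)
def pvStep (M : List (List Bool)) (e : Int) : PySem.Dict Int Bool → Int → PySem.Dict Int Bool :=
  fun d j => d.insert j ((PySem.List.pyRange (j + 1) (e + 1) 1).any
    (fun k => PySem.List.pyGetD (PySem.List.pyGetD M j []) k false && d.getD k false))

def pvFold (M : List (List Bool)) (e s : Int) : PySem.Dict Int Bool :=
  (PySem.List.pyRange (e - 1) (s - 1) (-1)).foldl (pvStep M e) ((PySem.Dict.empty).insert e true)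

theorem pvFold_peel (M : List (List Bool)) (e s : Int) (hslt : s < e) :
    pvFold M e s = pvStep M e (pvFold M e (s + 1)) s := by
  unfold pvFold
  have hsplit : PySem.List.pyRange (e - 1) (s - 1) (-1)
      = PySem.List.pyRange (e - 1) ((s + 1) - 1) (-1) ++ [s] := by
    rw [PySem.List.pyRange_neg_one_eq_reverse, PySem.List.pyRange_neg_one_eq_reverse]
    have h1 : (s - 1) + 1 = s := by omega
    have h2 : (e - 1) + 1 = e := by omega
    have h3 : ((s + 1) - 1) + 1 = s + 1 := by omega
    rw [h1, h2, h3]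
    rw [PySem.List.pyRange_one_cons (by omega : s < e)]
    simp
  rw [hsplit, List.foldl_append]
  simp [List.foldl]

-- B's DP fold invariant: after processing rows e-1 down to s, every key in [s, e]
-- holds the reachability value
theorem fold_inv (M : List (List Bool)) (e : Int) :
    ∀ n : Nat, ∀ s : Int, (e - s).toNat = n → s ≤ e → ∀ k : Int, s ≤ k → k ≤ e →
      (pvFold M e s).getD k false = reachC M e k := by
  intro n
  induction n with
  | zero =>
    intro s hn hs k hk1 hk2
    have hse : s = e := by omega
    have hke : k = e := by omega
    subst hse; subst hke
    unfold pvFold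
    rw [PySem.List.pyRange_neg_one_eq_nil (by omega)]
    simp only [List.foldl_nil]
    rw [PySem.Dict.getD_insert, if_pos rfl, reachC_eq, if_pos rfl]
  | succ m ih =>
    intro s hn hs k hk1 hk2
    have hslt : s < e := by omega
    rw [pvFold_peel M e s hslt]
    unfold pvStep
    rw [PySem.Dict.getD_insert]
    by_cases hks : k = s
    · rw [if_pos hks]
      subst hks
      rw [reachC_eq M e k, if_neg (by omega : ¬ k = e)]
      apply any_congr_mem
      intro x hx
      rw [PySem.List.mem_pyRange_one] at hx
      rw [ih (k + 1) (by omega) (by omega) x (by omega) (by omega)]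
      rfl
    · rw [if_neg hks]
      exact ih (s + 1) (by omega) (by omega) k (by omega) hk2

-- ===== VERDICT (by name: the statement is the Claim_ definition above) =====
theorem search_final_fen_bi_spec : Claim_equal_search_final_fen_bi := by
  intro mll pil M ra i e _hDom _hPre
  unfold Spec_search_final_fen_bi search_final_fen_bi search_final_fen_bi_alt
  by_cases h1 : i = e
  · subst h1
    rw [if_pos rfl, pvA_go_eq, reachC_eq, if_pos rfl]
  · rw [if_neg h1]
    by_cases h2 : i > e
    · rw [if_pos h2, pvA_go_eq]
      unfold reachC
      have h0 : (e - i).toNat = 0 := by omega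
      rw [h0]
      simp [reachN, h1]
    · rw [if_neg h2, pvA_go_eq]
      show reachC M e i = if !((pvFold M e i).getD i false) then false else true
      rw [fold_inv M e (e - i).toNat i rfl (by omega) i (by omega) (by omega)]
      cases hR : reachC M e i <;> simp
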